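-- pv_equiv track=rewrite | github.com/zzs95/daily-paper-reader | src/generate_docs.py | split_sidebar_tag
-- ===== SOURCE A (Python) =====
-- from typing import Any, Dict, List, Tuple
--
-- def split_sidebar_tag(tag: str) -> Tuple[str, str]:
--     """
--     将 tag 解析为 (kind, label)：
--     - keyword:xxx -> ("keyword", "xxx")
--     - query:xxx   -> ("query", "xxx")
--     - paper/ref/cite:xxx -> ("paper", "xxx")  # 预留：论文引用/跟踪标签
--     - 其它 -> ("other", 原文本)
--     """
--     raw = (tag or "").strip()
--     if not raw:
--         return ("other", "")
--     for prefix, kind in (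
--         ("keyword:", "keyword"),
--         ("query:", "query"),
--         ("paper:", "paper"),
--         ("ref:", "paper"),
--         ("cite:", "paper"),
--     ):
--         if raw.startswith(prefix):
--             label = raw[len(prefix) :].strip()
--             # composite 是 llm refine 的内部 requirement 后缀，不对前端展示。
--             if kind == "query" and label.endswith(":composite"):
--                 label = label[: -len(":composite")].strip()
--             return (kind, label)
--     return ("other", raw)
-- ===== SOURCE B (Python) =====
-- _KINDS = {"keyword": "keyword", "query": "query", "paper": "paper", "ref": "paper", "cite": "paper"}
--
-- def split_sidebar_tag(tag):
--     raw = (tag or "").strip()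
--     if not raw:
--         return ("other", "")
--     head, sep, rest = raw.partition(":")
--     kind = _KINDS.get(head)
--     if not sep or kind is None:
--         return ("other", raw)
--     label = rest.strip()
--     if kind == "query" and label.endswith(":composite"):
--         label = label[: -len(":composite")].strip()
--     return (kind, label)
-- ===== Notes on version B (the rewrite author's own statement) =====
-- stated objective: idiomatic
-- what changed: Replaces the ordered scan over five prefix tests with a single partition of the stripped tag at its first colon followed by one dict lookup of the head word.
import Mathlib
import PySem

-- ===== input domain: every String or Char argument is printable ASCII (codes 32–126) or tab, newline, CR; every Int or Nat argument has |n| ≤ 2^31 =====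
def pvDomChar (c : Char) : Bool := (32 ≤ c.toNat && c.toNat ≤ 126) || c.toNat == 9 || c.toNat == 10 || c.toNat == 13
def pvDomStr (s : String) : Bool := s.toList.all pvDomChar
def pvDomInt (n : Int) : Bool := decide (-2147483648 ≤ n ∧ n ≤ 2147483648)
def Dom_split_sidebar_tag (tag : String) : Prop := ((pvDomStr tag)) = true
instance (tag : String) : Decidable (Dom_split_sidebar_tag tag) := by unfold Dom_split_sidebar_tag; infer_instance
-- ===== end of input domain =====

-- B replaces A's ordered scan of five startswith-prefix tests by one partition at the
-- first ':' plus a dict lookup of the head word (idiomatic restructuring, same behaviour).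

-- ===== PORT A =====
def splitTagLoopA (pairs : List (List Char × String)) (raw : List Char) : Option (String × String) :=
  match pairs with
  | [] => none
  | (pfx, kind) :: rest =>
    if PySem.Chars.startswith raw pfx then
      let label := PySem.Chars.strip (PySem.Chars.slice raw (some (pfx.length : Int)) none)
      let label := if kind == "query" && PySem.Chars.endswith label (":composite".toList) then
          PySem.Chars.strip (PySem.Chars.slice label none (some (-10))) else label
      some (kind, String.ofList label)
    else splitTagLoopA rest raw

def split_sidebar_tag (tag : String) : String × String :=
  let raw := PySem.Chars.strip tag.toList
  if raw.isEmpty then ("other", "")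
  else
    match splitTagLoopA
        [("keyword:".toList, "keyword"), ("query:".toList, "query"),
         ("paper:".toList, "paper"), ("ref:".toList, "paper"), ("cite:".toList, "paper")] raw with
    | some r => r
    | none => ("other", String.ofList raw)

-- ===== PORT B =====
def kindsB : PySem.Dict String String :=
  PySem.Dict.ofList [("keyword", "keyword"), ("query", "query"), ("paper", "paper"), ("ref", "paper"), ("cite", "paper")]

def split_sidebar_tag_alt (tag : String) : String × String :=
  let raw := PySem.Chars.strip tag.toList
  if raw.isEmpty then ("other", "")
  else
    let i := PySem.Chars.find raw [':']
    let head := if i = -1 then raw else raw.take i.toNat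
    let sep : List Char := if i = -1 then [] else [':']
    let rest : List Char := if i = -1 then [] else raw.drop (i.toNat + 1)
    match if sep.isEmpty then none else PySem.Dict.get? kindsB (String.ofList head) with
    | none => ("other", String.ofList raw)
    | some kind =>
      let label := PySem.Chars.strip rest
      let label := if kind == "query" && PySem.Chars.endswith label (":composite".toList) then
          PySem.Chars.strip (PySem.Chars.slice label none (some (-10))) else label
      (kind, String.ofList label)


-- ===== PRECONDITION & SPEC =====
def Spec_split_sidebar_tag (tag : String) (out : String × String) : Prop := out = split_sidebar_tag_alt tag
instance (tag : String) (out : String × String) : Decidable (Spec_split_sidebar_tag tag out) := by unfold Spec_split_sidebar_tag; infer_instance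

-- ===== CLAIM (what is proved, stated in full; the proofs are below) =====
def Claim_equal_split_sidebar_tag : Prop := ∀ (tag : String), Dom_split_sidebar_tag tag → Spec_split_sidebar_tag tag (split_sidebar_tag tag)

-- ===== LEMMAS AND PROOFS =====
lemma startswith_colon_false {raw w : List Char} (h : ':' ∉ raw) :
    PySem.Chars.startswith raw (w ++ [':']) = false := by
  cases hp : PySem.Chars.startswith raw (w ++ [':']) with
  | false => rfl
  | true =>
    exfalso
    simp only [PySem.Chars.startswith] at hp
    have hpre : (w ++ [':']) <+: raw := List.isPrefixOf_iff_prefix.mp hp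
    exact h (hpre.sublist.mem (by simp))

lemma startswith_head {raw w : List Char} {k : Nat}
    (hk : PySem.Chars.find raw [':'] = (k : Int)) (hw : ':' ∉ w) :
    PySem.Chars.startswith raw (w ++ [':']) = decide (raw.take k = w) := by
  have h0 : 0 ≤ PySem.Chars.find raw [':'] := by rw [hk]; positivity
  obtain ⟨h1, h2⟩ := PySem.Chars.find_spec h0
  rw [hk] at h1 h2
  simp only [Int.toNat_natCast] at h1 h2
  obtain ⟨t, ht⟩ := h1
  have hklen : k < raw.length := by
    by_contra hle
    have : raw.drop k = [] := List.drop_eq_nil_iff.mpr (by omega)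
    rw [this] at ht; simp at ht
  by_cases he : raw.take k = w
  · have : (w ++ [':']) <+: raw := by
      refine ⟨t, ?_⟩
      calc (w ++ [':']) ++ t = raw.take k ++ ([':'] ++ t) := by rw [he]; simp
        _ = raw.take k ++ raw.drop k := by rw [ht]
        _ = raw := List.take_append_drop k raw
    simp [PySem.Chars.startswith, List.isPrefixOf_iff_prefix, this, he]
  · simp only [he, decide_false]
    cases hp : PySem.Chars.startswith raw (w ++ [':']) with
    | false => rfl
    | true =>
      exfalso
      simp only [PySem.Chars.startswith] at hp
      obtain ⟨t2, ht2⟩ := List.isPrefixOf_iff_prefix.mp hp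
      have hwl : w.length = k := by
        rcases lt_trichotomy w.length k with hlt | heq | hgt
        · exact absurd ⟨t2, by rw [← ht2]; simp⟩ (h2 w.length hlt)
        · exact heq
        · exfalso
          have hgetc : raw[k]'hklen = ':' := by
            have := congrArg (fun l => l[0]?) ht
            simpa [List.getElem?_drop, List.getElem?_eq_getElem hklen] using this.symm
          have hpw : w <+: raw := ⟨[':'] ++ t2, by rw [← ht2]; simp⟩
          have : w[k]'hgt = raw[k]'hklen := hpw.getElem hgt
          exact hw (by rw [← hgetc, ← this]; exact List.getElem_mem hgt)
      apply he
      rw [← hwl, ← ht2]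
      rw [List.append_assoc, List.take_append_of_le_length (le_refl w.length)]
      simp

lemma beq_ofList (s : String) (l : List Char) : (s == String.ofList l) = decide (l = s.toList) := by
  by_cases h : l = s.toList
  · subst h; simp
  · rw [decide_eq_false h]
    apply beq_eq_false_iff_ne.mpr
    intro he; exact h (by rw [he]; simp)


lemma infix_singleton_mem {a : Char} {l : List Char} : [a] <:+: l ↔ a ∈ l := by
  constructor
  · exact fun h => h.sublist.mem (by simp)
  · intro h
    obtain ⟨s, t, rfl⟩ := List.mem_iff_append.mp h
    exact ⟨s, t, by simp⟩


-- ===== VERDICT (by name: the statement is the Claim_ definition above) =====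
theorem split_sidebar_tag_spec : Claim_equal_split_sidebar_tag := by
  intro tag _dom
  unfold Spec_split_sidebar_tag

  unfold split_sidebar_tag split_sidebar_tag_alt
  set raw := PySem.Chars.strip tag.toList with hraw
  by_cases hempty : raw.isEmpty
  · simp [hempty]
  · simp only [hempty, if_false, Bool.false_eq_true]
    have e1 : "keyword:".toList = "keyword".toList ++ [':'] := by decide
    have e2 : "query:".toList = "query".toList ++ [':'] := by decide
    have e3 : "paper:".toList = "paper".toList ++ [':'] := by decide
    have e4 : "ref:".toList = "ref".toList ++ [':'] := by decide
    have e5 : "cite:".toList = "cite".toList ++ [':'] := by decide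
    by_cases hi : PySem.Chars.find raw [':'] = -1
    · have hmem : ':' ∉ raw := by
        have := (PySem.Chars.find_eq_neg_one_iff (s := raw) (sub := [':'])).mp hi
        exact fun hm => this (infix_singleton_mem.mpr hm)
      simp only [splitTagLoopA, e1, e2, e3, e4, e5, startswith_colon_false hmem, hi,
        if_true, if_false, Bool.false_eq_true, List.isEmpty_nil]
    · have h0 : 0 ≤ PySem.Chars.find raw [':'] := by
        have := PySem.Chars.neg_one_le_find raw [':']
        omega
      set k := (PySem.Chars.find raw [':']).toNat with hkdef
      have hk : PySem.Chars.find raw [':'] = (k : Int) := (Int.toNat_of_nonneg h0).symm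
      have hkle : k ≤ raw.length := by
        have := PySem.Chars.find_le_length raw [':']
        omega
      have s1 := startswith_head (w := "keyword".toList) hk (by decide)
      have s2 := startswith_head (w := "query".toList) hk (by decide)
      have s3 := startswith_head (w := "paper".toList) hk (by decide)
      have s4 := startswith_head (w := "ref".toList) hk (by decide)
      have s5 := startswith_head (w := "cite".toList) hk (by decide)
      simp only [splitTagLoopA, e1, e2, e3, e4, e5, s1, s2, s3, s4, s5, hi, if_false,
        List.isEmpty_cons, Bool.false_eq_true]
      have hlen : ∀ w : List Char, raw.take k = w → k = w.length := by
        intro w hw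
        have := congrArg List.length hw
        simpa [min_eq_left hkle] using this
      have hitems : kindsB.items = [("keyword", "keyword"), ("query", "query"), ("paper", "paper"), ("ref", "paper"), ("cite", "paper")] := by decide
      simp only [PySem.Dict.get?, hitems, List.find?, Option.map]
      have hsl : ∀ (w : List Char), PySem.Chars.slice raw (some ((w ++ [':']).length : Int)) none = raw.drop (w.length + 1) := by
        intro w
        rw [PySem.Chars.slice_eq_listSlice, PySem.List.slice_from raw (by positivity)]
        simp
      have hs8 : PySem.List.slice raw (some 8) none = raw.drop 8 := by
        rw [PySem.List.slice_from raw (by norm_num)]; rfl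
      have hs6 : PySem.List.slice raw (some 6) none = raw.drop 6 := by
        rw [PySem.List.slice_from raw (by norm_num)]; rfl
      have hs4 : PySem.List.slice raw (some 4) none = raw.drop 4 := by
        rw [PySem.List.slice_from raw (by norm_num)]; rfl
      have hs5 : PySem.List.slice raw (some 5) none = raw.drop 5 := by
        rw [PySem.List.slice_from raw (by norm_num)]; rfl
      by_cases hw1 : raw.take k = ['k','e','y','w','o','r','d']
      · have hk7 : k = 7 := by simpa using hlen _ hw1
        rw [hk7] at hw1
        simp [hk7, hw1, hs8]
      · by_cases hw2 : raw.take k = ['q','u','e','r','y']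
        · have hk7 : k = 5 := by simpa using hlen _ hw2
          rw [hk7] at hw2
          simp [hk7, hw2, hs6]
        · by_cases hw3 : raw.take k = ['p','a','p','e','r']
          · have hk7 : k = 5 := by simpa using hlen _ hw3
            rw [hk7] at hw3
            simp [hk7, hw3, hs6]
          · by_cases hw4 : raw.take k = ['r','e','f']
            · have hk7 : k = 3 := by simpa using hlen _ hw4
              rw [hk7] at hw4
              simp [hk7, hw4, hs4]
            · by_cases hw5 : raw.take k = ['c','i','t','e']
              · have hk7 : k = 4 := by simpa using hlen _ hw5
                rw [hk7] at hw5
                simp [hk7, hw5, hs5]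
              · simp [hw1, hw2, hw3, hw4, hw5, beq_ofList]
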